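-- pv_equiv track=rewrite | github.com/pkoopongithub/ARS_ExplainableAI | ARSXAI8.py | _generate_nonterminal_name
-- ===== SOURCE A (Python) =====
-- def _generate_nonterminal_name(sequence):
--     """Generiert einen Namen für ein neues Nonterminal"""
--     if all(isinstance(s, str) for s in sequence):
--         # Versuche, einen semantischen Namen zu generieren
--         seq_str = ' '.join(sequence)
--         if any('B' in s for s in sequence) and any('d' in s for s in sequence):
--             typ = "BEDARF"
--         elif any('A' in s for s in sequence) and any('E' in s for s in sequence):
--             typ = "BERATUNG"
--         elif any('A' in s for s in sequence) and any('A' in s for s in sequence):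
--             typ = "ABSCHLUSS"
--         elif any('G' in s for s in sequence):
--             typ = "BEGRUESSUNG"
--         elif any('V' in s for s in sequence):
--             typ = "VERABSCHIEDUNG"
--         else:
--             typ = "SEQUENZ"
--         return f"NT_{typ}_{len(sequence)}"
--     else:
--         return f"NT_SEQ_{len(sequence)}"
-- ===== SOURCE B (Python) =====
-- def _generate_nonterminal_name(sequence):
--     """Generiert einen Namen für ein neues Nonterminal"""
--     if not all(isinstance(s, str) for s in sequence):
--         return f"NT_SEQ_{len(sequence)}"
--     # single pass over all characters, accumulating six flags
--     hB = hd = hA = hE = hG = hV = False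
--     for s in sequence:
--         for c in s:
--             if c == 'B':
--                 hB = True
--             elif c == 'd':
--                 hd = True
--             elif c == 'A':
--                 hA = True
--             elif c == 'E':
--                 hE = True
--             elif c == 'G':
--                 hG = True
--             elif c == 'V':
--                 hV = True
--     if hB and hd:
--         typ = "BEDARF"
--     elif hA and hE:
--         typ = "BERATUNG"
--     elif hA:
--         typ = "ABSCHLUSS"
--     elif hG:
--         typ = "BEGRUESSUNG"
--     elif hV:
--         typ = "VERABSCHIEDUNG"
--     else:
--         typ = "SEQUENZ"
--     return f"NT_{typ}_{len(sequence)}"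
-- ===== Notes on version B (the rewrite author's own statement) =====
-- stated objective: alternative
-- what changed: Replaces the twelve any('X' in s ...) generator scans (each re-walking the whole sequence) by a single pass over every character that accumulates six boolean flags, then the same decision chain reads the flags.
import Mathlib
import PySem

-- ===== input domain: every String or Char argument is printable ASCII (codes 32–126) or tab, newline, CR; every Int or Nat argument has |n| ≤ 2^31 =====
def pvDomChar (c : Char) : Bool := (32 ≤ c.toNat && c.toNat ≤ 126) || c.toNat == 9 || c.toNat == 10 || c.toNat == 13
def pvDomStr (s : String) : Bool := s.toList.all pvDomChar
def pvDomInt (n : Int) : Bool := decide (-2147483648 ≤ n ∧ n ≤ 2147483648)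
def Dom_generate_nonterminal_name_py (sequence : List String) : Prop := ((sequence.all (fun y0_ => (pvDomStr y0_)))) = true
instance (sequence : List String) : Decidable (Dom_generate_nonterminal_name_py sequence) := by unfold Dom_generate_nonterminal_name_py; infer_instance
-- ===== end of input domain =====

-- B replaces A's twelve any('X' in s) rescans by one accumulating pass over all characters; return value only, no side effects.

-- ===== PORT A =====
-- all(isinstance(s, str) ...) is always true under the List String signature, so A takes the str branch.
def generate_nonterminal_name_py (sequence : List String) : String :=
  let _seq_str := PySem.Str.join " " sequence
  let typ : String :=
    if (sequence.any (fun s => PySem.Str.isIn "B" s)) && (sequence.any (fun s => PySem.Str.isIn "d" s)) then "BEDARF"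
    else if (sequence.any (fun s => PySem.Str.isIn "A" s)) && (sequence.any (fun s => PySem.Str.isIn "E" s)) then "BERATUNG"
    else if (sequence.any (fun s => PySem.Str.isIn "A" s)) && (sequence.any (fun s => PySem.Str.isIn "A" s)) then "ABSCHLUSS"
    else if sequence.any (fun s => PySem.Str.isIn "G" s) then "BEGRUESSUNG"
    else if sequence.any (fun s => PySem.Str.isIn "V" s) then "VERABSCHIEDUNG"
    else "SEQUENZ"
  "NT_" ++ typ ++ "_" ++ PySem.Int.toStr (sequence.length : Int)

-- ===== PORT B =====
def pvStep (st : Bool × Bool × Bool × Bool × Bool × Bool) (c : Char) : Bool × Bool × Bool × Bool × Bool × Bool :=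
  match st with
  | (hB, hd, hA, hE, hG, hV) =>
    if c = 'B' then (true, hd, hA, hE, hG, hV)
    else if c = 'd' then (hB, true, hA, hE, hG, hV)
    else if c = 'A' then (hB, hd, true, hE, hG, hV)
    else if c = 'E' then (hB, hd, hA, true, hG, hV)
    else if c = 'G' then (hB, hd, hA, hE, true, hV)
    else if c = 'V' then (hB, hd, hA, hE, hG, true)
    else (hB, hd, hA, hE, hG, hV)

def generate_nonterminal_name_py_alt (sequence : List String) : String :=
  let st := sequence.foldl (fun st s => s.toList.foldl pvStep st) (false, false, false, false, false, false)
  match st with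
  | (hB, hd, hA, hE, hG, hV) =>
    let typ : String :=
      if hB && hd then "BEDARF"
      else if hA && hE then "BERATUNG"
      else if hA then "ABSCHLUSS"
      else if hG then "BEGRUESSUNG"
      else if hV then "VERABSCHIEDUNG"
      else "SEQUENZ"
    "NT_" ++ typ ++ "_" ++ PySem.Int.toStr (sequence.length : Int)

-- ===== PRECONDITION & SPEC =====
def Spec_generate_nonterminal_name_py (sequence : List String) (out : String) : Prop := out = generate_nonterminal_name_py_alt sequence
instance (sequence : List String) (out : String) : Decidable (Spec_generate_nonterminal_name_py sequence out) := by unfold Spec_generate_nonterminal_name_py; infer_instance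

-- ===== CLAIM (what is proved, stated in full; the proofs are below) =====
def Claim_equal_generate_nonterminal_name_py : Prop := ∀ (sequence : List String), Dom_generate_nonterminal_name_py sequence → Spec_generate_nonterminal_name_py sequence (generate_nonterminal_name_py sequence)

-- ===== LEMMAS AND PROOFS =====

-- one pvStep application ors each flag with an equality test against its character
lemma pvStep_eq (hB hd hA hE hG hV : Bool) (c : Char) :
    pvStep (hB, hd, hA, hE, hG, hV) c =
      (hB || decide ('B' = c), hd || decide ('d' = c), hA || decide ('A' = c),
       hE || decide ('E' = c), hG || decide ('G' = c), hV || decide ('V' = c)) := by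
  simp only [pvStep]
  split_ifs with h1 h2 h3 h4 h5 h6 <;>
    first
      | (subst_vars; simp; done)
      | (simp
         exact ⟨fun h => absurd h.symm h1, fun h => absurd h.symm h2, fun h => absurd h.symm h3,
                fun h => absurd h.symm h4, fun h => absurd h.symm h5, fun h => absurd h.symm h6⟩)

-- the character fold ors each flag with membership of the corresponding character
lemma pvStep_foldl (cs : List Char) (hB hd hA hE hG hV : Bool) :
    cs.foldl pvStep (hB, hd, hA, hE, hG, hV) =
      (hB || cs.contains 'B', hd || cs.contains 'd', hA || cs.contains 'A',
       hE || cs.contains 'E', hG || cs.contains 'G', hV || cs.contains 'V') := by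
  induction cs generalizing hB hd hA hE hG hV with
  | nil => simp
  | cons c cs ih =>
    rw [List.foldl_cons, pvStep_eq, ih]
    simp [Bool.or_assoc]

-- single-character 'x in s' is membership of that character
lemma pvIsIn_single (c : Char) (s : String) :
    PySem.Str.isIn (String.ofList [c]) s = s.toList.contains c := by
  rcases h : PySem.Str.isIn (String.ofList [c]) s with _ | _
  · have h2 : ¬ ((String.ofList [c]).toList <:+: s.toList) := fun hin => by
      have := (PySem.Str.isIn_iff_infix (String.ofList [c]) s).mpr hin
      simp_all
    rw [String.toList_ofList, List.singleton_infix_iff] at h2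
    simp [h2]
  · have h2 := (PySem.Str.isIn_iff_infix (String.ofList [c]) s).mp h
    rw [String.toList_ofList, List.singleton_infix_iff] at h2
    simp [h2]

-- the outer fold computes the six any-scans of A
lemma pvFold_eq_any (sequence : List String) :
    sequence.foldl (fun st s => s.toList.foldl pvStep st) (false, false, false, false, false, false) =
      (sequence.any (fun s => s.toList.contains 'B'), sequence.any (fun s => s.toList.contains 'd'),
       sequence.any (fun s => s.toList.contains 'A'), sequence.any (fun s => s.toList.contains 'E'),
       sequence.any (fun s => s.toList.contains 'G'), sequence.any (fun s => s.toList.contains 'V')) := by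
  have gen : ∀ (l : List String) (hB hd hA hE hG hV : Bool),
      l.foldl (fun st s => s.toList.foldl pvStep st) (hB, hd, hA, hE, hG, hV) =
        (hB || l.any (fun s => s.toList.contains 'B'), hd || l.any (fun s => s.toList.contains 'd'),
         hA || l.any (fun s => s.toList.contains 'A'), hE || l.any (fun s => s.toList.contains 'E'),
         hG || l.any (fun s => s.toList.contains 'G'), hV || l.any (fun s => s.toList.contains 'V')) := by
    intro l
    induction l with
    | nil => simp
    | cons s l ih =>
      intro hB hd hA hE hG hV
      simp only [List.foldl_cons, pvStep_foldl, ih, List.any_cons]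
      simp [Bool.or_assoc]
  simpa using gen sequence false false false false false false

-- ===== VERDICT (by name: the statement is the Claim_ definition above) =====
theorem generate_nonterminal_name_py_spec : Claim_equal_generate_nonterminal_name_py := by
  intro sequence _
  show generate_nonterminal_name_py sequence = generate_nonterminal_name_py_alt sequence
  unfold generate_nonterminal_name_py generate_nonterminal_name_py_alt
  simp only [pvFold_eq_any]
  have hB := pvIsIn_single 'B'
  have hd := pvIsIn_single 'd'
  have hA := pvIsIn_single 'A'
  have hE := pvIsIn_single 'E'
  have hG := pvIsIn_single 'G'
  have hV := pvIsIn_single 'V'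
  simp only [show ("B" : String) = String.ofList ['B'] from rfl, show ("d" : String) = String.ofList ['d'] from rfl,
    show ("A" : String) = String.ofList ['A'] from rfl, show ("E" : String) = String.ofList ['E'] from rfl,
    show ("G" : String) = String.ofList ['G'] from rfl, show ("V" : String) = String.ofList ['V'] from rfl,
    hB, hd, hA, hE, hG, hV, Bool.and_self]
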